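-- pv_equiv track=rewrite | github.com/lambdabypi/miniquest-adventure-planner | backend/app/agents/discovery/discovery_agent.py | _extract_visitor_tips
-- ===== SOURCE A (Python) =====
-- from typing import List, Dict, Optional
--
-- def _extract_visitor_tips(research: List[Dict]) -> List[str]:
--     tips = []
--     if any(r.get("has_hours_info")                             for r in research):
--         tips.append("Current hours information found - check before visiting")
--     if any(r.get("has_menu_info") or r.get("has_activity_info") for r in research):
--         tips.append("Menu/activity details available - check current offerings")
--     if any(r.get("has_current_info")                           for r in research):
--         tips.append("Recently updated information available")
--     return tips[:3]
-- ===== SOURCE B (Python) =====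
-- from typing import List, Dict, Optional
--
-- def _extract_visitor_tips(research: List[Dict]) -> List[str]:
--     # One pass over research, OR-accumulating the three flags; then build the tips.
--     hours = menu = current = False
--     for r in research:
--         hours = hours or bool(r.get("has_hours_info"))
--         menu = menu or bool(r.get("has_menu_info")) or bool(r.get("has_activity_info"))
--         current = current or bool(r.get("has_current_info"))
--     tips = []
--     if hours:
--         tips.append("Current hours information found - check before visiting")
--     if menu:
--         tips.append("Menu/activity details available - check current offerings")
--     if current:
--         tips.append("Recently updated information available")
--     return tips
-- ===== Notes on version B (the rewrite author's own statement) =====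
-- stated objective: simpler
-- what changed: Replaces three separate any-scans over research plus a redundant [:3] slice with a single pass that OR-accumulates three booleans and then assembles the tips list.
import Mathlib
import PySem

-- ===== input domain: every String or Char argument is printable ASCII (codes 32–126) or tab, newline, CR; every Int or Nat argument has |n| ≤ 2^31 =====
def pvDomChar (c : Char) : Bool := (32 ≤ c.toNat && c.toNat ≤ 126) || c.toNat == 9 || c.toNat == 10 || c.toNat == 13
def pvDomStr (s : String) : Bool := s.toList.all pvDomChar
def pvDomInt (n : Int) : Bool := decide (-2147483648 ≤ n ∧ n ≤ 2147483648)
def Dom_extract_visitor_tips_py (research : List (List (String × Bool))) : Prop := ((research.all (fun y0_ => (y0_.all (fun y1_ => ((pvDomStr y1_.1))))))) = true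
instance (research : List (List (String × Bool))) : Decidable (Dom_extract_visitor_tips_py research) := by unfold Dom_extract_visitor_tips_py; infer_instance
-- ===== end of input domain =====

-- B replaces A's three any-scans and redundant [:3] slice with one OR-accumulating pass; objective: simpler.

-- ===== PORT A =====
-- r.get(k): dict lookup, None (falsy) when absent
def pyGetFlag (r : List (String × Bool)) (k : String) : Bool :=
  ((PySem.Dict.mk r).get? k).getD false

def extract_visitor_tips_py (research : List (List (String × Bool))) : List String :=
  let tips : List String := []
  let tips := if research.any (fun r => pyGetFlag r "has_hours_info") then
      tips ++ ["Current hours information found - check before visiting"] else tips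
  let tips := if research.any (fun r => pyGetFlag r "has_menu_info" || pyGetFlag r "has_activity_info") then
      tips ++ ["Menu/activity details available - check current offerings"] else tips
  let tips := if research.any (fun r => pyGetFlag r "has_current_info") then
      tips ++ ["Recently updated information available"] else tips
  PySem.List.slice tips none (some 3)

-- ===== PORT B =====
-- bool(r.get(k)) via first-match association-list lookup
def flagOf (r : List (String × Bool)) (k : String) : Bool :=
  ((r.find? (fun p => p.1 == k)).map Prod.snd).getD false

def extract_visitor_tips_py_alt (research : List (List (String × Bool))) : List String :=
  let st := research.foldl
    (fun (s : Bool × Bool × Bool) r =>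
      (s.1 || flagOf r "has_hours_info",
       s.2.1 || flagOf r "has_menu_info" || flagOf r "has_activity_info",
       s.2.2 || flagOf r "has_current_info"))
    (false, false, false)
  (if st.1 then ["Current hours information found - check before visiting"] else []) ++
  (if st.2.1 then ["Menu/activity details available - check current offerings"] else []) ++
  (if st.2.2 then ["Recently updated information available"] else [])

-- ===== PRECONDITION & SPEC =====
def Spec_extract_visitor_tips_py (research : List (List (String × Bool))) (out : List String) : Prop := out = extract_visitor_tips_py_alt research
instance (research : List (List (String × Bool))) (out : List String) : Decidable (Spec_extract_visitor_tips_py research out) := by unfold Spec_extract_visitor_tips_py; infer_instance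

-- ===== CLAIM (what is proved, stated in full; the proofs are below) =====
def Claim_equal_extract_visitor_tips_py : Prop := ∀ (research : List (List (String × Bool))), Dom_extract_visitor_tips_py research → Spec_extract_visitor_tips_py research (extract_visitor_tips_py research)

-- ===== LEMMAS AND PROOFS =====

-- the two lookups agree
theorem flagOf_eq_pyGetFlag (r : List (String × Bool)) (k : String) :
    flagOf r k = pyGetFlag r k := by
  induction r with
  | nil => rfl
  | cons p rest ih =>
    simp only [flagOf, pyGetFlag] at *
    rw [PySem.Dict.get?_mk_cons, List.find?_cons]
    by_cases h : p.1 == k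
    · simp [h]
    · simp [h, ih]

-- the fold computes the three any-scans
theorem fold_eq_any (research : List (List (String × Bool))) (a b c : Bool) :
    research.foldl
      (fun (s : Bool × Bool × Bool) r =>
        (s.1 || flagOf r "has_hours_info",
         s.2.1 || flagOf r "has_menu_info" || flagOf r "has_activity_info",
         s.2.2 || flagOf r "has_current_info"))
      (a, b, c)
    = (a || research.any (fun r => flagOf r "has_hours_info"),
       b || research.any (fun r => flagOf r "has_menu_info" || flagOf r "has_activity_info"),
       c || research.any (fun r => flagOf r "has_current_info")) := by
  induction research generalizing a b c with
  | nil => simp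
  | cons r rest ih =>
    simp only [List.foldl, List.any_cons, ih]
    refine Prod.ext ?_ (Prod.ext ?_ ?_) <;> simp [Bool.or_assoc]

-- ===== VERDICT (by name: the statement is the Claim_ definition above) =====
theorem extract_visitor_tips_py_spec : Claim_equal_extract_visitor_tips_py := by
  intro research _
  show extract_visitor_tips_py research = extract_visitor_tips_py_alt research
  unfold extract_visitor_tips_py extract_visitor_tips_py_alt
  rw [fold_eq_any]
  simp only [Bool.false_or, flagOf_eq_pyGetFlag]
  split_ifs <;> simp [PySem.List.slice_to]
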